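-- pv_equiv track=rewrite | github.com/seven-renato/algorithms-data-structures | Ponteiros/lista_ava/valendo/questao10.py | contaEspaco
-- ===== SOURCE A (Python) =====
-- def contaEspaco(string):
--     num = 0
--     lista = []
--     for letra in string:
--         if letra == " ":
--             num += 1
--         else:
--             lista.append(num)
--             num = 0
--     return max(lista)
-- ===== SOURCE B (Python) =====
-- def contaEspaco(string):
--     idx = [i for i, c in enumerate(string) if c != " "]
--     return max(j - i - 1 for i, j in zip([-1] + idx, idx))
-- ===== Notes on version B (the rewrite author's own statement) =====
-- stated objective: alternative
-- what changed: B drops A's running space counter and growing list: it collects the indices of non-space characters and takes the max of the gaps between consecutive indices (index arithmetic via enumerate/zip) instead of the mutable counter loop.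
import Mathlib
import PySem

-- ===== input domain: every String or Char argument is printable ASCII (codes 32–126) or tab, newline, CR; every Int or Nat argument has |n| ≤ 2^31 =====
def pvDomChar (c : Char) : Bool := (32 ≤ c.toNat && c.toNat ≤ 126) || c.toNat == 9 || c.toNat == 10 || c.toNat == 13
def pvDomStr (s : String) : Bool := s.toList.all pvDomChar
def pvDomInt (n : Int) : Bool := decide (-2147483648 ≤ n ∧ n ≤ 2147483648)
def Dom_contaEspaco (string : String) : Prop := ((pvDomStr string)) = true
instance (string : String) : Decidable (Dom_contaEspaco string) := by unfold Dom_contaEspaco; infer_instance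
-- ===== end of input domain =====

-- B replaces A's running space counter with index arithmetic: the gaps between
-- consecutive non-space positions; objective: alternative (same O(n) cost).

-- ===== PORT A =====
-- max(lista) raises ValueError on an empty list; Pre_ excludes exactly those
-- inputs, so the `.getD 0` default is never relied upon inside the claim.
def contaEspaco (string : String) : Int :=
  (PySem.List.max?
    (string.toList.foldl
      (fun (s : Int × List Int) letra =>
        if letra = ' ' then (s.1 + 1, s.2) else (0, s.2 ++ [s.1]))
      ((0 : Int), ([] : List Int))).2
    (fun x => x)).getD 0

-- ===== PORT B =====
-- max(...) over an empty generator raises ValueError; same `.getD 0` convention.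
def pvIdxList (string : String) : List Int :=
  ((PySem.List.enumerate string.toList 0).filter (fun p => p.2 != ' ')).map (fun p => p.1)

def contaEspaco_alt (string : String) : Int :=
  (PySem.List.max?
    ((((-1 : Int) :: pvIdxList string).zip (pvIdxList string)).map (fun p => p.2 - p.1 - 1))
    (fun x => x)).getD 0

-- ===== PRECONDITION & SPEC =====
-- Pre_ excludes empty/all-space strings, on which Python's max([]) raises ValueError in both A and B.
def Pre_contaEspaco (string : String) : Prop := string.toList.any (fun c => c != ' ') = true
instance (string : String) : Decidable (Pre_contaEspaco string) := by unfold Pre_contaEspaco; infer_instance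
def pvWitness_contaEspaco : String := " a"
def Spec_contaEspaco (string : String) (out : Int) : Prop := out = contaEspaco_alt string
instance (string : String) (out : Int) : Decidable (Spec_contaEspaco string out) := by unfold Spec_contaEspaco; infer_instance

-- ===== CLAIM (what is proved, stated in full; the proofs are below) =====
def Claim_equal_contaEspaco : Prop := ∀ (string : String), Dom_contaEspaco string → Pre_contaEspaco string → Spec_contaEspaco string (contaEspaco string)

-- ===== LEMMAS AND PROOFS =====

/-- Reference: the list of preceding-space counts, with `n` spaces already seen. -/
def pvSpec (n : Int) : List Char → List Int
  | [] => []
  | c :: t => if c = ' ' then pvSpec (n + 1) t else n :: pvSpec 0 t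

/-- The non-space indices starting at offset `s`. -/
def pvIdxs (s : Int) : List Char → List Int
  | [] => []
  | c :: t => if c = ' ' then pvIdxs (s + 1) t else s :: pvIdxs (s + 1) t

/-- Gaps between consecutive entries, previous entry `p`. -/
def pvGaps (p : Int) : List Int → List Int
  | [] => []
  | j :: t => (j - p - 1) :: pvGaps j t

theorem pvA_fold (l : List Char) : ∀ (num : Int) (acc : List Int),
    (l.foldl (fun (s : Int × List Int) letra =>
      if letra = ' ' then (s.1 + 1, s.2) else (0, s.2 ++ [s.1])) (num, acc)).2
      = acc ++ pvSpec num l := by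
  induction l with
  | nil => intro num acc; simp [pvSpec]
  | cons c t ih =>
    intro num acc
    by_cases hc : c = ' ' <;> simp [pvSpec, hc, ih]

theorem pvB_zip (idx : List Int) : ∀ (p : Int),
    ((p :: idx).zip idx).map (fun q => q.2 - q.1 - 1) = pvGaps p idx := by
  induction idx with
  | nil => intro p; simp [pvGaps]
  | cons j t ih =>
    intro p
    show ((p, j) :: ((j :: t).zip t)).map (fun q => q.2 - q.1 - 1) = pvGaps p (j :: t)
    simp only [List.map_cons, pvGaps, ih j]

theorem pvB_idx (l : List Char) : ∀ (s : Int),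
    ((PySem.List.enumerate l s).filter (fun p => p.2 != ' ')).map (fun p => p.1)
      = pvIdxs s l := by
  induction l with
  | nil => intro s; simp [PySem.List.enumerate_nil, pvIdxs]
  | cons c t ih =>
    intro s
    by_cases hc : c = ' ' <;>
      simp [PySem.List.enumerate_cons, pvIdxs, hc, ih]

theorem pvGaps_idxs (l : List Char) : ∀ (s p : Int),
    pvGaps p (pvIdxs s l) = pvSpec (s - p - 1) l := by
  induction l with
  | nil => intro s p; simp [pvIdxs, pvSpec, pvGaps]
  | cons c t ih =>
    intro s p
    by_cases hc : c = ' '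
    · simp only [pvIdxs, pvSpec]
      rw [if_pos hc, if_pos hc, ih (s + 1) p]
      congr 1
      ring
    · simp only [pvIdxs, pvSpec]
      rw [if_neg hc, if_neg hc, pvGaps, ih (s + 1) s]
      congr 2
      ring

-- ===== VERDICT (by name: the statement is the Claim_ definition above) =====
theorem contaEspaco_spec : Claim_equal_contaEspaco := by
  intro string _ _
  unfold Spec_contaEspaco contaEspaco contaEspaco_alt pvIdxList
  rw [pvA_fold, pvB_idx, pvB_zip, pvGaps_idxs]
  norm_num
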